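-- pv_equiv track=rewrite | github.com/jcraig949jfi/Prometheus | cartography/shared/scripts/v2/recurrence_stability.py | verify_recurrence_mod_p
-- ===== SOURCE A (Python) =====
-- def verify_recurrence_mod_p(terms, coeffs_int, degree, p):
--     """Check if reduced recurrence holds in F_p.
--
--     Recurrence: a(n) = -c_1*a(n-1) - c_2*a(n-2) - ... - c_k*a(n-k)
--     (BM convention: characteristic polynomial x^k + c_1*x^{k-1} + ... + c_k)
--
--     So predicted = -sum(coeffs[j] * terms[i-j-1]) for j in 0..degree-1.
--
--     Returns (n_checks, n_mismatches).
--     """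
--     n = len(terms)
--     if degree >= n:
--         return 0, 0
--
--     # Reduce coefficients mod p
--     coeffs_mod = [c % p for c in coeffs_int]
--     terms_mod = [t % p for t in terms]
--
--     n_checks = 0
--     n_mismatches = 0
--
--     # Check from position degree to end
--     check_end = min(n, degree + max(50, n))  # check all available terms
--     for i in range(degree, check_end):
--         predicted = 0
--         for j in range(degree):
--             predicted += (-coeffs_mod[j]) * terms_mod[i - j - 1]
--         predicted = predicted % p
--         actual = terms_mod[i]
--         n_checks += 1
--         if predicted != actual:
--             n_mismatches += 1
--
--     return n_checks, n_mismatches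
-- ===== SOURCE B (Python) =====
-- def verify_recurrence_mod_p(terms, coeffs_int, degree, p):
--     """Row-wise accumulation: add each coefficient's shifted, scaled copy of the
--     term sequence into one prediction vector, then compare residues once."""
--     n = len(terms)
--     if degree >= n:
--         return 0, 0
--     m = n - degree
--     pred = [0] * m
--     for j, c in enumerate(coeffs_int[:degree]):
--         cm = (-c) % p
--         seg = terms[degree - 1 - j : n - 1 - j]
--         pred = [q + cm * t for q, t in zip(pred, seg)]
--     mismatches = sum(1 for q, t in zip(pred, terms[degree:]) if q % p != t % p)
--     return m, mismatches
-- ===== Notes on version B (the rewrite author's own statement) =====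
-- stated objective: alternative
-- what changed: B interchanges the loops: instead of an inner dot product per position, it accumulates each coefficient's shifted scaled copy of the term sequence into one prediction vector (row-wise), computes the check count in closed form, and takes residues only once at the final comparison. Pre_ restricts to the natural domain: negative degree is excluded (a recurrence order is a nonnegative count; …
-- outside the precondition, e.g. on verify_recurrence_mod_p([1, 2, 3], [], -1, 5): A returns (4, 4), B returns (4, 1)
import Mathlib
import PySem

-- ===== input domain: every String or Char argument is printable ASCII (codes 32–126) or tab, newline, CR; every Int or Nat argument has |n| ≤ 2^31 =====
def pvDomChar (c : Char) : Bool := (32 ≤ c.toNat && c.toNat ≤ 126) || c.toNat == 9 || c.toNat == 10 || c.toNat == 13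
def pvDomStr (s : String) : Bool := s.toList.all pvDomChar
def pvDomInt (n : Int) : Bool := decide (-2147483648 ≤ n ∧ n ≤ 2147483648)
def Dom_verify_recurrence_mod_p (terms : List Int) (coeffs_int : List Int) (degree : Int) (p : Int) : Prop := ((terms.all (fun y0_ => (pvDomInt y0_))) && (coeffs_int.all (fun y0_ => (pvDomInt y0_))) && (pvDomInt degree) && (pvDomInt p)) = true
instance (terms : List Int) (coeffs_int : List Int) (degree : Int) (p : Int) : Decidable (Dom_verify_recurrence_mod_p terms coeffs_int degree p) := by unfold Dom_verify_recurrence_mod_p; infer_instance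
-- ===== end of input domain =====

-- B interchanges A's loops: row-wise accumulation of shifted scaled term rows instead of a per-position dot product (alternative decomposition, same cost).


-- ===== PORT A =====
def verify_recurrence_mod_p (terms : List Int) (coeffs_int : List Int) (degree : Int) (p : Int) : Int × Int :=
  let n : Int := PySem.List.len terms
  if degree ≥ n then (0, 0)
  else
    let coeffs_mod := coeffs_int.map (fun c => PySem.Int.mod c p)
    let terms_mod := terms.map (fun t => PySem.Int.mod t p)
    let check_end := min n (degree + max 50 n)
    (PySem.List.pyRange degree check_end 1).foldl
      (fun (st : Int × Int) i =>
        let predicted :=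
          (PySem.List.pyRange 0 degree 1).foldl
            (fun acc j =>
              acc + (-(PySem.List.pyGetD coeffs_mod j 0)) * PySem.List.pyGetD terms_mod (i - j - 1) 0)
            0
        let predicted2 := PySem.Int.mod predicted p
        let actual := PySem.List.pyGetD terms_mod i 0
        (st.1 + 1, if predicted2 ≠ actual then st.2 + 1 else st.2))
      ((0 : Int), (0 : Int))

-- ===== PORT B =====
def verify_recurrence_mod_p_alt (terms : List Int) (coeffs_int : List Int) (degree : Int) (p : Int) : Int × Int :=
  let n : Int := PySem.List.len terms
  if degree ≥ n then (0, 0)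
  else
    let m := n - degree
    let pred0 : List Int := PySem.List.pyRepeat [0] m
    let pred :=
      (PySem.List.enumerate (PySem.List.slice coeffs_int none (some degree)) 0).foldl
        (fun pred (jc : Int × Int) =>
          let cm := PySem.Int.mod (-jc.2) p
          let seg := PySem.List.slice terms (some (degree - 1 - jc.1)) (some (n - 1 - jc.1))
          (List.zip pred seg).map (fun qt => qt.1 + cm * qt.2))
        pred0
    let mismatches :=
      (List.zip pred (PySem.List.slice terms (some degree) none)).foldl
        (fun (acc : Int) qt => if PySem.Int.mod qt.1 p ≠ PySem.Int.mod qt.2 p then acc + 1 else acc)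
        0
    (m, mismatches)

-- ===== PRECONDITION & SPEC =====
-- Pre_ restricts to the function's natural domain: a recurrence order is a nonnegative count, so
-- negative degree is excluded (there A's negative term indices wrap around to the end of the list,
-- or raise IndexError), and when degree < len(terms) it requires p ≠ 0 and degree ≤ len(coeffs_int)
-- (otherwise A raises ZeroDivisionError / IndexError).
def Pre_verify_recurrence_mod_p (terms : List Int) (coeffs_int : List Int) (degree : Int) (p : Int) : Prop :=
  0 ≤ degree ∧ (degree < (terms.length : Int) → (p ≠ 0 ∧ degree ≤ (coeffs_int.length : Int)))
instance (terms : List Int) (coeffs_int : List Int) (degree : Int) (p : Int) : Decidable (Pre_verify_recurrence_mod_p terms coeffs_int degree p) := by unfold Pre_verify_recurrence_mod_p; infer_instance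

def pvWitness_verify_recurrence_mod_p : List Int × List Int × Int × Int := ([1, 1, 2], [-1, -1], 2, 5)

def Spec_verify_recurrence_mod_p (terms : List Int) (coeffs_int : List Int) (degree : Int) (p : Int) (out : Int × Int) : Prop := out = verify_recurrence_mod_p_alt terms coeffs_int degree p
instance (terms : List Int) (coeffs_int : List Int) (degree : Int) (p : Int) (out : Int × Int) : Decidable (Spec_verify_recurrence_mod_p terms coeffs_int degree p out) := by unfold Spec_verify_recurrence_mod_p; infer_instance

-- ===== CLAIM (what is proved, stated in full; the proofs are below) =====
def Claim_equal_verify_recurrence_mod_p : Prop := ∀ (terms : List Int) (coeffs_int : List Int) (degree : Int) (p : Int), Dom_verify_recurrence_mod_p terms coeffs_int degree p → Pre_verify_recurrence_mod_p terms coeffs_int degree p → Spec_verify_recurrence_mod_p terms coeffs_int degree p (verify_recurrence_mod_p terms coeffs_int degree p)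

-- ===== LEMMAS AND PROOFS =====

-- Python's mod is a representative of the congruence class: mod a p ≡ a (mod p).
theorem pvMod_modEq (a p : Int) : PySem.Int.mod a p ≡ a [ZMOD p] := by
  have h := PySem.Int.floordiv_mul_add_mod a p
  exact Int.modEq_iff_dvd.mpr ⟨PySem.Int.floordiv a p, by linarith [mul_comm (PySem.Int.floordiv a p) p]⟩

-- Congruent integers have the same Python residue (p ≠ 0).
theorem pvMod_congr {p : Int} (hp : p ≠ 0) {x y : Int} (h : x ≡ y [ZMOD p]) :
    PySem.Int.mod x p = PySem.Int.mod y p := by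
  have hx : PySem.Int.mod x p ≡ PySem.Int.mod y p [ZMOD p] :=
    ((pvMod_modEq x p).trans h).trans (pvMod_modEq y p).symm
  have hd : p ∣ (PySem.Int.mod y p - PySem.Int.mod x p) := Int.ModEq.dvd hx
  have hz : PySem.Int.mod y p - PySem.Int.mod x p = 0 := by
    apply Int.eq_zero_of_dvd_of_natAbs_lt_natAbs hd
    rcases lt_or_gt_of_ne hp with hneg | hpos
    · have b1 := PySem.Int.mod_neg_bounds x hneg
      have b2 := PySem.Int.mod_neg_bounds y hneg
      omega
    · have b1l := PySem.Int.mod_nonneg x hpos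
      have b1u := PySem.Int.mod_lt x hpos
      have b2l := PySem.Int.mod_nonneg y hpos
      have b2u := PySem.Int.mod_lt y hpos
      omega
  omega

-- Pointwise-congruent range sums are congruent.
theorem pvSum_modEq (p : Int) (f g : Nat → Int) :
    ∀ d : Nat, (∀ j < d, f j ≡ g j [ZMOD p]) →
    ((List.range d).map f).sum ≡ ((List.range d).map g).sum [ZMOD p] := by
  intro d
  induction d with
  | zero => intro _; rfl
  | succ d ih =>
    intro h
    rw [List.range_succ, List.map_append, List.map_append, List.sum_append, List.sum_append]
    exact Int.ModEq.add (ih (fun j hj => h j (by omega))) (by simpa using h d (by omega))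

theorem pvFoldCountLen (l : List Int) : l.foldl (fun (a : Int) _ => a + 1) 0 = (l.length : Int) := by
  induction l using List.reverseRecOn with
  | nil => rfl
  | append_singleton l x ih => simp [ih]


theorem pvZipMap (F : Nat → Int) (m a : Nat) (xs : List Int) (h : a + m ≤ xs.length) (c : Int) :
    (List.zip ((List.range m).map F) (List.take m (List.drop a xs))).map (fun qt => qt.1 + c * qt.2)
      = (List.range m).map (fun k => F k + c * xs.getD (a + k) 0) := by
  apply List.ext_getElem
  · simp; omega
  · intro k h1 h2
    have hk : k < m := by simp at h2; omega
    have hak : a + k < xs.length := by omega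
    simp only [List.getElem_map, List.getElem_zip, List.getElem_range, List.getElem_take,
      List.getElem_drop, List.getD_eq_getElem?_getD, List.getElem?_eq_getElem hak,
      Option.getD_some]

theorem pvZipDrop (F : Nat → Int) (m d : Nat) (xs : List Int) (h : xs.length = d + m) :
    List.zip ((List.range m).map F) (xs.drop d)
      = (List.range m).map (fun k => (F k, xs.getD (d + k) 0)) := by
  apply List.ext_getElem
  · simp; omega
  · intro k h1 h2
    have hk : k < m := by simp at h2; omega
    have hdk : d + k < xs.length := by omega
    simp only [List.getElem_map, List.getElem_zip, List.getElem_range, List.getElem_drop,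
      List.getD_eq_getElem?_getD, List.getElem?_eq_getElem hdk, Option.getD_some]

theorem pvGetDMap (f : Int → Int) (l : List Int) (j : Nat) (h : j < l.length) :
    (l.map f).getD j 0 = f (l.getD j 0) := by
  have h2 : j < (l.map f).length := by simp [h]
  rw [List.getD_eq_getElem _ _ h2, List.getD_eq_getElem _ _ h, List.getElem_map]

theorem pvPredInv (xs : List Int) (p : Int) (d m : Nat) (hN : xs.length = d + m) :
    ∀ (t : List Int) (s : Nat) (F : Nat → Int), s + t.length ≤ d →
    (PySem.List.enumerate t (s : Int)).foldl
      (fun pred (jc : Int × Int) =>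
        (List.zip pred (PySem.List.slice xs (some ((d : Int) - 1 - jc.1)) (some (((d : Int) + (m : Int)) - 1 - jc.1)))).map
          (fun qt => qt.1 + PySem.Int.mod (-jc.2) p * qt.2))
      ((List.range m).map F)
    = (List.range m).map (fun k => F k + ((List.range t.length).map
        (fun u => PySem.Int.mod (-(t.getD u 0)) p * xs.getD (d - 1 - (s + u) + k) 0)).sum) := by
  intro t
  induction t with
  | nil => intro s F _; simp [PySem.List.enumerate_nil]
  | cons c rest ih =>
    intro s F hs
    rw [PySem.List.enumerate_cons, List.foldl_cons]
    have hsd : s < d := by simp at hs; omega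
    have ha1 : (d : Int) - 1 - ((s : Int)) = ((d - 1 - s : Nat) : Int) := by omega
    have ha2 : ((d : Int) + (m : Int)) - 1 - ((s : Int)) = ((d - 1 - s : Nat) : Int) + (m : Int) := by omega
    simp only [ha1, ha2, PySem.List.slice_natCast_add]
    rw [pvZipMap F m (d - 1 - s) xs (by omega) (PySem.Int.mod (-c) p)]
    have hc : ((s : Int) + 1) = (((s + 1 : Nat)) : Int) := by omega
    rw [hc, ih (s + 1) _ (by simp at hs ⊢; omega)]
    apply List.map_congr_left
    intro k _
    rw [List.length_cons, List.range_succ_eq_map, List.map_cons, List.sum_cons]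
    have : ∀ u : Nat, (fun u => PySem.Int.mod (-((c :: rest).getD u 0)) p * xs.getD (d - 1 - (s + u) + k) 0) (Nat.succ u)
         = (fun u => PySem.Int.mod (-(rest.getD u 0)) p * xs.getD (d - 1 - (s + 1 + u) + k) 0) u := by
      intro u
      have h1 : s + Nat.succ u = s + 1 + u := by omega
      simp [h1]
    rw [List.map_map]
    simp only [Function.comp_def, this]
    simp only [List.getD_cons_zero, Nat.add_zero]
    ring

theorem pvPointwise (terms coeffs : List Int) (p : Int) (hp : p ≠ 0) (d k : Nat) :
    PySem.Int.mod (((List.range d).map (fun j => -(PySem.Int.mod (coeffs.getD j 0) p) * PySem.Int.mod (terms.getD (d - 1 - j + k) 0) p)).sum) p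
      = PySem.Int.mod (((List.range d).map (fun u => PySem.Int.mod (-(coeffs.getD u 0)) p * terms.getD (d - 1 - u + k) 0)).sum) p := by
  apply pvMod_congr hp
  apply pvSum_modEq
  intro j hj
  exact Int.ModEq.trans (Int.ModEq.mul (pvMod_modEq _ p).neg (pvMod_modEq _ p))
        (Int.ModEq.mul (pvMod_modEq _ p) Int.ModEq.rfl).symm

-- ===== VERDICT (by name: the statement is the Claim_ definition above) =====
theorem verify_recurrence_mod_p_spec : Claim_equal_verify_recurrence_mod_p := by
  intro terms coeffs degree p hdom hpre
  unfold Spec_verify_recurrence_mod_p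
  obtain ⟨hdeg0, hrest⟩ := hpre
  by_cases hge : degree ≥ (terms.length : Int)
  · simp [verify_recurrence_mod_p, verify_recurrence_mod_p_alt, PySem.List.len_eq, hge]
  · push Not at hge
    obtain ⟨hp, hdc⟩ := hrest hge
    set N := terms.length with hNdef
    set d := degree.toNat with hddef
    have hd : degree = (d : Int) := by omega
    obtain ⟨m, hN⟩ : ∃ m, N = d + m := ⟨N - d, by omega⟩
    have hlen : PySem.List.len terms = (N : Int) := by simp [PySem.List.len_eq, hNdef]
    simp only [verify_recurrence_mod_p, verify_recurrence_mod_p_alt, hlen]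
    rw [if_neg (by omega), if_neg (by omega)]
    have hmin : min ((N : Int)) (degree + max 50 (N : Int)) = (N : Int) := by
      simp only [min_def, max_def]; split_ifs <;> omega
    rw [hmin]
    rw [PySem.List.foldl_prod_mk (f := fun (a : Int) (_ : Int) => a + 1)
      (g := fun (a : Int) (i : Int) =>
        if PySem.Int.mod
            (List.foldl (fun acc j => acc + -PySem.List.pyGetD (List.map (fun c => PySem.Int.mod c p) coeffs) j 0 *
                PySem.List.pyGetD (List.map (fun t => PySem.Int.mod t p) terms) (i - j - 1) 0) 0
              (PySem.List.pyRange 0 degree)) p ≠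
          PySem.List.pyGetD (List.map (fun t => PySem.Int.mod t p) terms) i 0 then a + 1 else a)]
    rw [pvFoldCountLen, PySem.List.length_pyRange_one]
    rw [PySem.List.foldl_ite_add_one]
    have hNc : (N : Int) = (d : Int) + (m : Int) := by omega
    have hmc : ((N : Int) - degree).toNat = m := by omega
    rw [PySem.List.pyRepeat_singleton, hmc]
    have hrep : List.replicate m (0 : Int) = (List.range m).map (fun _ => (0 : Int)) := by simp
    rw [hrep]
    simp only [hd, hNc]
    rw [PySem.List.slice_to coeffs (by omega)]
    simp only [Int.toNat_natCast]
    have hinv := pvPredInv terms p d m (by omega) (coeffs.take d) 0 (fun _ => (0 : Int))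
      (by simp only [Nat.zero_add, List.length_take]; omega)
    rw [Nat.cast_zero] at hinv
    rw [hinv]
    rw [PySem.List.slice_from terms (by positivity)]
    simp only [Int.toNat_natCast]
    rw [pvZipDrop _ m d terms (by omega)]
    rw [PySem.List.foldl_ite_add_one, List.countP_map]
    rw [PySem.List.pyRange_one]
    rw [PySem.List.pyRange_one]
    have hmm : ((d : Int) + (m : Int) - (d : Int)).toNat = m := by omega
    have hdd : ((d : Int) - 0).toNat = d := by omega
    rw [hmm, hdd, List.countP_map]
    rw [Prod.mk.injEq]
    refine ⟨by omega, ?_⟩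
    rw [zero_add, zero_add]
    congr 1
    apply List.countP_congr
    intro k hk
    have hkm : k < m := List.mem_range.mp hk
    simp only [Function.comp_apply, decide_eq_true_eq]
    have hsumA : List.foldl (fun acc j => acc + -PySem.List.pyGetD (List.map (fun c => PySem.Int.mod c p) coeffs) j 0 * PySem.List.pyGetD (List.map (fun t => PySem.Int.mod t p) terms) ((d : Int) + (k : Int) - j - 1) 0) 0 (List.map (fun u : Nat => (0 : Int) + (u : Int)) (List.range d))
        = ((List.range d).map (fun j => -(PySem.Int.mod (coeffs.getD j 0) p) * PySem.Int.mod (terms.getD (d - 1 - j + k) 0) p)).sum := by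
      rw [PySem.List.foldl_add, zero_add, List.map_map]
      refine congrArg List.sum (List.map_congr_left ?_)
      intro j hj
      have hjd : j < d := List.mem_range.mp hj
      simp only [Function.comp_apply, zero_add]
      rw [PySem.List.pyGetD_natCast, pvGetDMap _ _ j (by omega)]
      have hidx : (d : Int) + (k : Int) - (j : Int) - 1 = ((d - 1 - j + k : Nat) : Int) := by omega
      rw [hidx, PySem.List.pyGetD_natCast, pvGetDMap _ _ _ (by omega)]
    have hact : PySem.List.pyGetD (List.map (fun t => PySem.Int.mod t p) terms) ((d : Int) + (k : Int)) 0
        = PySem.Int.mod (terms.getD (d + k) 0) p := by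
      have hik : (d : Int) + (k : Int) = ((d + k : Nat) : Int) := by omega
      rw [hik, PySem.List.pyGetD_natCast, pvGetDMap _ _ _ (by omega)]
    have hsumB : (0 : Int) + ((List.range (List.take d coeffs).length).map
          (fun u => PySem.Int.mod (-(List.take d coeffs).getD u 0) p * terms.getD (d - 1 - (0 + u) + k) 0)).sum
        = ((List.range d).map (fun u => PySem.Int.mod (-(coeffs.getD u 0)) p * terms.getD (d - 1 - u + k) 0)).sum := by
      rw [zero_add]
      have hlt : (List.take d coeffs).length = d := by simp; omega
      rw [hlt]
      refine congrArg List.sum (List.map_congr_left ?_)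
      intro u hu
      have hud : u < d := List.mem_range.mp hu
      have hgd : (List.take d coeffs).getD u 0 = coeffs.getD u 0 := by
        simp [List.getD_eq_getElem?_getD, hud]
      rw [hgd, Nat.zero_add]
    rw [hsumA, hact, hsumB, pvPointwise terms coeffs p hp d k]
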